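-- pv_equiv track=rewrite | github.com/ErnestFistozz/CoverageImporter | src/patch_files.py | patch_files
-- ===== SOURCE A (Python) =====
-- def patch_files(files: list[str], language_extension: str) -> dict:
--     code_count, test_count = 0, 0
--     for file in files:
--         if file.endswith(language_extension):
--             if 'test' in file:
--                 test_count += 1
--             else:
--                 code_count += 1
--     return {
--         'test_files': 1 if code_count == 0 and test_count > 0 else 0,
--         'code_files': 1 if code_count > 0 and test_count == 0 else 0,
--         'test_code_files': 1 if code_count > 0 and test_count > 0 else 0,
--         'other_files': 1 if code_count == 0 and test_count == 0 else 0,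
--     }
-- ===== SOURCE B (Python) =====
-- def patch_files(files: list[str], language_extension: str) -> dict:
--     matching = [f for f in files if f.endswith(language_extension)]
--     has_test = any('test' in f for f in matching)
--     has_code = any('test' not in f for f in matching)
--     keys = ('other_files', 'test_files', 'code_files', 'test_code_files')
--     hit = keys[(2 if has_code else 0) + (1 if has_test else 0)]
--     return {k: 1 if k == hit else 0
--             for k in ('test_files', 'code_files', 'test_code_files', 'other_files')}
-- ===== Notes on version B (the rewrite author's own statement) =====
-- stated objective: simpler
-- what changed: Replaces the counting loop with a filter plus two boolean any() scans and a table lookup keyed on the (has_code, has_test) state instead of count comparisons.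
import Mathlib
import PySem

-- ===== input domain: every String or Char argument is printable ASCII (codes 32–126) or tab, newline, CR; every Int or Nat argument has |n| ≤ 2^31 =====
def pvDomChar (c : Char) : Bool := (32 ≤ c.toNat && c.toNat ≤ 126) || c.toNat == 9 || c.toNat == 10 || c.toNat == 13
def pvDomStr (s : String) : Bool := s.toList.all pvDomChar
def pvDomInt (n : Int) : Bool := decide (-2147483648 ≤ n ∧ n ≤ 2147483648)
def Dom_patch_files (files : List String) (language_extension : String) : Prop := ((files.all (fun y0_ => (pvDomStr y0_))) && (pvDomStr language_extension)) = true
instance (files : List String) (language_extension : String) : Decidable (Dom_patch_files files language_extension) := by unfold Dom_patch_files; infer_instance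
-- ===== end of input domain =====

-- ===== PORT A =====
-- B replaces A's counting loop by a filter + two any() scans and a table lookup; same O(n) cost, simpler structure.
def patch_files (files : List String) (language_extension : String) : List (String × Int) :=
  let p := files.foldl
    (fun (acc : Int × Int) file =>
      if PySem.Str.endswith file language_extension then
        if PySem.Str.isIn "test" file then (acc.1, acc.2 + 1) else (acc.1 + 1, acc.2)
      else acc) (0, 0)
  [("test_files", if p.1 = 0 ∧ p.2 > 0 then 1 else 0),
   ("code_files", if p.1 > 0 ∧ p.2 = 0 then 1 else 0),
   ("test_code_files", if p.1 > 0 ∧ p.2 > 0 then 1 else 0),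
   ("other_files", if p.1 = 0 ∧ p.2 = 0 then 1 else 0)]

-- ===== PORT B =====
def patch_files_alt (files : List String) (language_extension : String) : List (String × Int) :=
  let matching := files.filter (fun f => PySem.Str.endswith f language_extension)
  let has_test := matching.any (fun f => PySem.Str.isIn "test" f)
  let has_code := matching.any (fun f => !(PySem.Str.isIn "test" f))
  let keys : List String := ["other_files", "test_files", "code_files", "test_code_files"]
  let hit := keys.getD (((if has_code then (2 : Int) else 0) + (if has_test then 1 else 0)).toNat) ""
  ["test_files", "code_files", "test_code_files", "other_files"].map
    (fun k => (k, if k == hit then (1 : Int) else 0))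

-- ===== PRECONDITION & SPEC =====
def Spec_patch_files (files : List String) (language_extension : String) (out : List (String × Int)) : Prop := out = patch_files_alt files language_extension
instance (files : List String) (language_extension : String) (out : List (String × Int)) : Decidable (Spec_patch_files files language_extension out) := by unfold Spec_patch_files; infer_instance

-- ===== CLAIM (what is proved, stated in full; the proofs are below) =====
def Claim_equal_patch_files : Prop := ∀ (files : List String) (language_extension : String), Dom_patch_files files language_extension → Spec_patch_files files language_extension (patch_files files language_extension)

-- ===== LEMMAS AND PROOFS =====

-- ===== VERDICT (by name: the statement is the Claim_ definition above) =====
def pvCnt (files : List String) (ext : String) (b : Bool) : Int :=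
  ((files.filter (fun f => PySem.Str.endswith f ext)).filter
     (fun f => PySem.Str.isIn "test" f == b)).length

lemma pvCnt_cons (f : String) (fs : List String) (ext : String) (b : Bool) :
    pvCnt (f :: fs) ext b =
      (if PySem.Str.endswith f ext = true ∧ (PySem.Str.isIn "test" f == b) = true
        then 1 else 0) + pvCnt fs ext b := by
  unfold pvCnt
  by_cases he : PySem.Str.endswith f ext = true
  · rw [List.filter_cons, if_pos he, List.filter_cons]
    by_cases ht : (PySem.Str.isIn "test" f == b) = true
    · rw [if_pos ht]
      simp at he ht
      simp [he, ht]
      ring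
    · rw [if_neg ht]
      simp at he ht
      simp [he, ht]
  · rw [List.filter_cons, if_neg he]
    simp at he
    simp [he]

lemma fold_counts (files : List String) (ext : String) : ∀ (c t : Int),
    files.foldl
      (fun (acc : Int × Int) file =>
        if PySem.Str.endswith file ext then
          if PySem.Str.isIn "test" file then (acc.1, acc.2 + 1) else (acc.1 + 1, acc.2)
        else acc) (c, t)
    = (c + pvCnt files ext false, t + pvCnt files ext true) := by
  induction files with
  | nil => intro c t; simp [pvCnt]
  | cons f fs ih =>
    intro c t
    simp only [List.foldl_cons]
    by_cases he : PySem.Str.endswith f ext = true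
    · by_cases ht : PySem.Str.isIn "test" f = true
      · rw [if_pos he, if_pos ht, ih, pvCnt_cons, pvCnt_cons,
            if_neg (by simp_all), if_pos (by simp_all)]
        simp only [Prod.mk.injEq]
        constructor <;> ring
      · rw [if_pos he, if_neg ht, ih, pvCnt_cons, pvCnt_cons,
            if_pos (by simp_all), if_neg (by simp_all)]
        simp only [Prod.mk.injEq]
        constructor <;> ring
    · rw [if_neg he, ih, pvCnt_cons, pvCnt_cons,
          if_neg (by simp_all), if_neg (by simp_all)]
      simp only [Prod.mk.injEq]
      constructor <;> ring

lemma cnt_pos_iff (files : List String) (ext : String) (b : Bool) :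
    0 < pvCnt files ext b ↔
      (files.filter (fun f => PySem.Str.endswith f ext)).any
        (fun f => PySem.Str.isIn "test" f == b) = true := by
  unfold pvCnt
  rw [List.any_eq_true]
  constructor
  · intro h
    rcases List.exists_mem_of_length_pos (by exact_mod_cast h) with ⟨x, hx⟩
    rcases List.mem_filter.mp hx with ⟨hm, hp⟩
    exact ⟨x, hm, hp⟩
  · rintro ⟨x, hx, hpx⟩
    have : x ∈ (files.filter (fun f => PySem.Str.endswith f ext)).filter
        (fun f => PySem.Str.isIn "test" f == b) := List.mem_filter.mpr ⟨hx, hpx⟩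
    have := List.length_pos_of_mem this
    exact_mod_cast this

lemma cnt_nonneg (files : List String) (ext : String) (b : Bool) :
    0 ≤ pvCnt files ext b := by
  unfold pvCnt; positivity

-- ===== VERDICT (by name: the statement is the Claim_ definition above) =====
theorem patch_files_spec : Claim_equal_patch_files := by
  unfold Claim_equal_patch_files
  intro files ext _
  unfold Spec_patch_files patch_files patch_files_alt
  simp only [fold_counts, Int.zero_add]
  have hc := cnt_pos_iff files ext false
  have ht := cnt_pos_iff files ext true
  have hc' : 0 < pvCnt files ext false ↔
      (files.filter (fun f => PySem.Str.endswith f ext)).any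
        (fun f => !(PySem.Str.isIn "test" f)) = true := by
    rw [hc]
    constructor <;>
      · rw [List.any_eq_true, List.any_eq_true]
        rintro ⟨x, hx, hpx⟩
        refine ⟨x, hx, ?_⟩
        revert hpx
        cases PySem.Str.isIn "test" x <;> simp
  have ht' : 0 < pvCnt files ext true ↔
      (files.filter (fun f => PySem.Str.endswith f ext)).any
        (fun f => PySem.Str.isIn "test" f) = true := by
    rw [ht]
    constructor <;>
      · rw [List.any_eq_true, List.any_eq_true]
        rintro ⟨x, hx, hpx⟩
        refine ⟨x, hx, ?_⟩
        revert hpx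
        cases PySem.Str.isIn "test" x <;> simp
  have hcn := cnt_nonneg files ext false
  have htn := cnt_nonneg files ext true
  by_cases hcode :
      (files.filter (fun f => PySem.Str.endswith f ext)).any
        (fun f => !(PySem.Str.isIn "test" f)) = true <;>
  by_cases htest :
      (files.filter (fun f => PySem.Str.endswith f ext)).any
        (fun f => PySem.Str.isIn "test" f) = true
  · have h1 : 0 < pvCnt files ext false := hc'.mpr hcode
    have h2 : 0 < pvCnt files ext true := ht'.mpr htest
    rw [hcode, htest,
        if_neg (show ¬(pvCnt files ext false = 0 ∧ pvCnt files ext true > 0) by omega),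
        if_neg (show ¬(pvCnt files ext false > 0 ∧ pvCnt files ext true = 0) by omega),
        if_pos (show pvCnt files ext false > 0 ∧ pvCnt files ext true > 0 from ⟨h1, h2⟩),
        if_neg (show ¬(pvCnt files ext false = 0 ∧ pvCnt files ext true = 0) by omega)]
    rfl
  · have h1 : 0 < pvCnt files ext false := hc'.mpr hcode
    have h2 : pvCnt files ext true = 0 := by
      have : ¬ 0 < pvCnt files ext true := fun h => htest (ht'.mp h)
      omega
    rw [hcode, Bool.not_eq_true] at *
    rw [htest,
        if_neg (show ¬(pvCnt files ext false = 0 ∧ pvCnt files ext true > 0) by omega),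
        if_pos (show pvCnt files ext false > 0 ∧ pvCnt files ext true = 0 from ⟨h1, h2⟩),
        if_neg (show ¬(pvCnt files ext false > 0 ∧ pvCnt files ext true > 0) by omega),
        if_neg (show ¬(pvCnt files ext false = 0 ∧ pvCnt files ext true = 0) by omega)]
    rfl
  · have h1 : pvCnt files ext false = 0 := by
      have : ¬ 0 < pvCnt files ext false := fun h => hcode (hc'.mp h)
      omega
    have h2 : 0 < pvCnt files ext true := ht'.mpr htest
    rw [Bool.not_eq_true] at hcode
    rw [hcode, htest,
        if_pos (show pvCnt files ext false = 0 ∧ pvCnt files ext true > 0 from ⟨h1, h2⟩),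
        if_neg (show ¬(pvCnt files ext false > 0 ∧ pvCnt files ext true = 0) by omega),
        if_neg (show ¬(pvCnt files ext false > 0 ∧ pvCnt files ext true > 0) by omega),
        if_neg (show ¬(pvCnt files ext false = 0 ∧ pvCnt files ext true = 0) by omega)]
    rfl
  · have h1 : pvCnt files ext false = 0 := by
      have : ¬ 0 < pvCnt files ext false := fun h => hcode (hc'.mp h)
      omega
    have h2 : pvCnt files ext true = 0 := by
      have : ¬ 0 < pvCnt files ext true := fun h => htest (ht'.mp h)
      omega
    rw [Bool.not_eq_true] at hcode htest
    rw [hcode, htest,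
        if_neg (show ¬(pvCnt files ext false = 0 ∧ pvCnt files ext true > 0) by omega),
        if_neg (show ¬(pvCnt files ext false > 0 ∧ pvCnt files ext true = 0) by omega),
        if_neg (show ¬(pvCnt files ext false > 0 ∧ pvCnt files ext true > 0) by omega),
        if_pos (show pvCnt files ext false = 0 ∧ pvCnt files ext true = 0 from ⟨h1, h2⟩)]
    rfl
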